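-- pv_equiv track=rewrite | github.com/KingTheSim/softuni_tasks | Python/python_algorithms/introduction_to_graphs/exercise/salaries.py | salary_finder
-- ===== SOURCE A (Python) =====
-- def salary_finder(current_sal, structure, all_salaries):
--     if all_salaries[current_sal] != 0:
--         return all_salaries[current_sal]
--     currently = 0
--     for lower in structure[current_sal]:
--         currently += salary_finder(lower, structure, all_salaries)
--     if currently == 0:
--         currently = 1
--         all_salaries[current_sal] = currently
--     else:
--         all_salaries[current_sal] = currently
--     return currently
-- ===== SOURCE B (Python) =====
-- # B: pure, side-effect-free recursion. A mutates all_salaries in place while it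
-- # works; B never writes to it (the equivalence claimed is about the return value).
-- def salary_finder(current_sal, structure, all_salaries):
--     def total(node):
--         cached = all_salaries[node]
--         if cached:
--             return cached
--         subtotal = sum(total(child) for child in structure[node])
--         return subtotal if subtotal else 1
--     return total(current_sal)
-- ===== Notes on version B (the rewrite author's own statement) =====
-- stated objective: simpler
-- what changed: A is a memoizing DFS that caches every computed subtotal by mutating all_salaries in place; B is a pure side-effect-free recursion (value = cached entry if nonzero, else sum of the children's values, defaulting to 1), with no cache writes at all - equivalence is about the return value (A additionally mutates its argument).
import Mathlib
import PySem

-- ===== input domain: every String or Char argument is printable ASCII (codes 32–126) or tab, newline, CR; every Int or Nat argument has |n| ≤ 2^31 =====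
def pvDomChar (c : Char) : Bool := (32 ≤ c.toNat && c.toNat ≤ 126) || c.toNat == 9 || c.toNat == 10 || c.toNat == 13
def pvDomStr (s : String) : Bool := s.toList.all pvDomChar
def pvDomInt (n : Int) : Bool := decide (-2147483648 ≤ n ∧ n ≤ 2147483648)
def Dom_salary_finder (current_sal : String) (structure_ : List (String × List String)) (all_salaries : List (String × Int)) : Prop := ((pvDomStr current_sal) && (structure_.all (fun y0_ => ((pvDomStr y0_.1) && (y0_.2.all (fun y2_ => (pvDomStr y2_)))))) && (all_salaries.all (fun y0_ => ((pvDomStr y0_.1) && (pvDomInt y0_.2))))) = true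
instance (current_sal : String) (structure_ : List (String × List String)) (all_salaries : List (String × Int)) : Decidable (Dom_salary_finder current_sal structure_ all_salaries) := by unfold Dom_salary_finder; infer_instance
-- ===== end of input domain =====

-- B changes the decomposition: A memoizes by mutating all_salaries, B is a pure
-- side-effect-free recursion (no cache writes). A mutates its all_salaries argument
-- in place; the equivalence proved here is about the RETURN value only.

-- Both dict parameters arrive as association lists (first-match lookup).
def pvLookup {α : Type} : List (String × α) → String → Option α
  | [], _ => none
  | (k, v) :: rest, x => if k = x then some v else pvLookup rest x

-- ===== PORT A =====
-- `all_salaries[n] = v` : overwrite the (first) binding of n in place.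
def pvStore : List (String × Int) → String → Int → List (String × Int)
  | [], _, _ => []
  | (k, v) :: rest, x, w => if k = x then (k, w) :: rest else (k, v) :: pvStore rest x w

-- A's recursion, transliterated.  The extra parameter K (keys not currently on the
-- call stack) is ONLY a totality guard: Python diverges on a cycle of zero-salary
-- nodes and raises KeyError on a missing key; both are excluded by Pre_ below, and
-- on Pre_ the `none`/`n ∉ K` branches are never taken.
mutual
def goA (st : List (String × List String)) : List String → String → List (String × Int) → Int × List (String × Int)
  | K, n, m =>
    match pvLookup m n with
    | none => (0, m)                         -- Python: KeyError (outside Pre_)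
    | some v =>
      if v ≠ 0 then (v, m)                   -- if all_salaries[current_sal] != 0: return it
      else
        match pvLookup st n with
        | none => (0, m)                     -- Python: KeyError (outside Pre_)
        | some ch =>
          if hn : n ∈ K then
            let p := goAList st (K.erase n) ch 0 m       -- currently = 0; for lower in …: currently += …
            let c := if p.1 = 0 then 1 else p.1          -- if currently == 0: currently = 1
            (c, pvStore p.2 n c)                         -- all_salaries[current_sal] = currently
          else (0, m)                        -- Python: infinite recursion on a zero-cycle (outside Pre_)
  termination_by K _ _ => (K.length, 0)
  decreasing_by exact Prod.Lex.left _ _ (by have h1 := List.length_erase_of_mem hn; have h2 := List.length_pos_of_mem hn; omega)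
def goAList (st : List (String × List String)) : List String → List String → Int → List (String × Int) → Int × List (String × Int)
  | _, [], acc, m => (acc, m)
  | K, l :: rest, acc, m =>
    let r := goA st K l m
    goAList st K rest (acc + r.1) r.2
  termination_by K ch _ _ => (K.length, ch.length + 1)
  decreasing_by all_goals (apply Prod.Lex.right; simp only [List.length_cons]; omega)
end

def salary_finder (current_sal : String) (structure_ : List (String × List String)) (all_salaries : List (String × Int)) : Int :=
  (goA structure_ (all_salaries.map (·.1)) current_sal all_salaries).1

-- ===== PORT B =====
-- B's pure recursion, transliterated; same K totality guard, never taken on Pre_.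
mutual
def goB (st : List (String × List String)) (sal : List (String × Int)) : List String → String → Int
  | K, n =>
    match pvLookup sal n with
    | none => 0                              -- Python: KeyError (outside Pre_)
    | some cached =>
      if cached ≠ 0 then cached              -- if cached: return cached
      else
        match pvLookup st n with
        | none => 0                          -- Python: KeyError (outside Pre_)
        | some ch =>
          if hn : n ∈ K then
            let s := goBSum st sal (K.erase n) ch        -- subtotal = sum(total(child) for child in …)
            if s = 0 then 1 else s                       -- subtotal if subtotal else 1
          else 0                             -- Python: infinite recursion on a zero-cycle (outside Pre_)
  termination_by K _ => (K.length, 0)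
  decreasing_by exact Prod.Lex.left _ _ (by have h1 := List.length_erase_of_mem hn; have h2 := List.length_pos_of_mem hn; omega)
def goBSum (st : List (String × List String)) (sal : List (String × Int)) : List String → List String → Int
  | _, [] => 0
  | K, c :: rest => goB st sal K c + goBSum st sal K rest
  termination_by K ch => (K.length, ch.length + 1)
  decreasing_by all_goals (apply Prod.Lex.right; simp only [List.length_cons]; omega)
end

def salary_finder_alt (current_sal : String) (structure_ : List (String × List String)) (all_salaries : List (String × Int)) : Int :=
  goB structure_ all_salaries (all_salaries.map (·.1)) current_sal

-- ===== PRECONDITION & SPEC =====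
-- Reachability through zero-salary nodes: one expansion step, iterated to a fixpoint.
def pvChildren (st : List (String × List String)) (n : String) : List String :=
  (st.lookup n).getD []
def pvStep (st : List (String × List String)) (sal : List (String × Int)) (S : List String) : List String :=
  S ++ S.flatMap (fun n => if sal.lookup n = some 0 then pvChildren st n else [])
def pvClosure (st : List (String × List String)) (sal : List (String × Int)) (S : List String) : List String :=
  (pvStep st sal)^[(S ++ st.flatMap (·.2)).toFinset.card + 1] S

-- Pre_ = exactly where the Python A returns normally: every node reachable from
-- current_sal through zero-salary nodes has an all_salaries entry, every reachable
-- zero-salary node has a structure entry and lies on no cycle of zero-salary nodes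
-- (else A diverges), and — one narrowing — both dicts have duplicate-free key lists:
-- a duplicate-key association list cannot arise from a Python dict, so the
-- list ↔ dict correspondence (first-match vs. last-write) is ambiguous there.
def Pre_salary_finder (current_sal : String) (structure_ : List (String × List String)) (all_salaries : List (String × Int)) : Prop :=
  (∀ n ∈ pvClosure structure_ all_salaries [current_sal], (all_salaries.lookup n).isSome) ∧
  (∀ n ∈ pvClosure structure_ all_salaries [current_sal], all_salaries.lookup n = some 0 →
      (structure_.lookup n).isSome ∧ n ∉ pvClosure structure_ all_salaries (pvChildren structure_ n)) ∧
  (all_salaries.map (·.1)).Nodup ∧ (structure_.map (·.1)).Nodup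
instance (current_sal : String) (structure_ : List (String × List String)) (all_salaries : List (String × Int)) : Decidable (Pre_salary_finder current_sal structure_ all_salaries) := by unfold Pre_salary_finder; infer_instance

def pvWitness_salary_finder : String × (List (String × List String)) × (List (String × Int)) :=
  ("ceo", [("ceo", ["a", "b"]), ("a", []), ("b", [])], [("ceo", 0), ("a", 0), ("b", 0)])

def Spec_salary_finder (current_sal : String) (structure_ : List (String × List String)) (all_salaries : List (String × Int)) (out : Int) : Prop := out = salary_finder_alt current_sal structure_ all_salaries
instance (current_sal : String) (structure_ : List (String × List String)) (all_salaries : List (String × Int)) (out : Int) : Decidable (Spec_salary_finder current_sal structure_ all_salaries out) := by unfold Spec_salary_finder; infer_instance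

-- ===== CLAIM (what is proved, stated in full; the proofs are below) =====
def Claim_equal_salary_finder : Prop := ∀ (current_sal : String) (structure_ : List (String × List String)) (all_salaries : List (String × Int)), Dom_salary_finder current_sal structure_ all_salaries → Pre_salary_finder current_sal structure_ all_salaries → Spec_salary_finder current_sal structure_ all_salaries (salary_finder current_sal structure_ all_salaries)

-- ===== LEMMAS AND PROOFS =====

theorem pv_witness_ok :
    Dom_salary_finder pvWitness_salary_finder.1 pvWitness_salary_finder.2.1 pvWitness_salary_finder.2.2 ∧
    Pre_salary_finder pvWitness_salary_finder.1 pvWitness_salary_finder.2.1 pvWitness_salary_finder.2.2 := by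
  constructor <;> decide

-- ---------- proof-side helpers ----------

-- the set of reachable nodes / the per-node reachability used below
def pvR (st : List (String × List String)) (sal : List (String × Int)) (cur : String) : List String :=
  pvClosure st sal [cur]
def pvReachP (st : List (String × List String)) (sal : List (String × Int)) (z c : String) : Prop :=
  c ∈ pvClosure st sal (pvChildren st z)
def pvK0 (sal : List (String × Int)) : List String := sal.map (·.1)
-- B's value function at the full key set: the common value both ports compute
def pvV (st : List (String × List String)) (sal : List (String × Int)) (n : String) : Int :=
  goB st sal (pvK0 sal) n
def pvSumV (st : List (String × List String)) (sal : List (String × Int)) : List String → Int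
  | [] => 0
  | c :: r => pvV st sal c + pvSumV st sal r
-- "every reachable zero node is either still allowed (in K) or a strict ancestor of n"
def pvHz (st : List (String × List String)) (sal : List (String × Int)) (cur : String) (K : List String) (n : String) : Prop :=
  ∀ z ∈ pvR st sal cur, pvLookup sal z = some 0 → z ∈ K ∨ pvReachP st sal z n
-- A's memo invariant: entries are the original ones, or correct computed values
def pvInv (st : List (String × List String)) (sal : List (String × Int)) (cur : String) (m : List (String × Int)) : Prop :=
  ∀ k, pvLookup m k = pvLookup sal k ∨
    (pvLookup sal k = some 0 ∧ k ∈ pvR st sal cur ∧ pvLookup m k = some (pvV st sal k) ∧ pvV st sal k ≠ 0)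
-- measure: allowed zero reachable nodes
def pvMu (st : List (String × List String)) (sal : List (String × Int)) (cur : String) (K : List String) : Nat :=
  (K.filter fun z => decide (pvLookup sal z = some 0 ∧ z ∈ pvR st sal cur)).length

-- ---------- basic list/lookup lemmas ----------

theorem pvLookup_mem_keys {α : Type} {l : List (String × α)} {n : String} {v : α}
    (h : pvLookup l n = some v) : n ∈ l.map (·.1) := by
  induction l with
  | nil => simp [pvLookup] at h
  | cons p rest ih =>
    obtain ⟨k, w⟩ := p
    by_cases hk : k = n
    · subst hk; simp
    · rw [pvLookup, if_neg hk] at h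
      simpa using Or.inr (ih h)

theorem pvLookup_eq_lookup {α : Type} [BEq α] : ∀ (l : List (String × α)) (k : String), pvLookup l k = l.lookup k := by
  intro l k
  induction l with
  | nil => rfl
  | cons p rest ih =>
    obtain ⟨a, v⟩ := p
    by_cases h : a = k
    · subst h; simp [pvLookup, List.lookup]
    · have hb : (k == a) = false := by
        simp only [beq_eq_false_iff_ne, ne_eq]
        exact fun e => h e.symm
      simp [pvLookup, List.lookup, h, ih, hb]

theorem pvLookup_sub_flatMap {st : List (String × List String)} {n : String} {ch : List String}
    (h : pvLookup st n = some ch) : ∀ c ∈ ch, c ∈ st.flatMap (·.2) := by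
  induction st with
  | nil => simp [pvLookup] at h
  | cons p rest ih =>
    obtain ⟨k, l⟩ := p
    by_cases hk : k = n
    · rw [pvLookup, if_pos hk] at h
      cases h; intro c hc; simp only [List.flatMap_cons, List.mem_append]; exact Or.inl hc
    · rw [pvLookup, if_neg hk] at h
      intro c hc; simp only [List.flatMap_cons, List.mem_append]; exact Or.inr (ih h c hc)

theorem pvChildren_sub_flatMap {st : List (String × List String)} {n c : String}
    (h : c ∈ pvChildren st n) : c ∈ st.flatMap (·.2) := by
  unfold pvChildren at h
  rw [← pvLookup_eq_lookup] at h
  cases hl : pvLookup st n with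
  | none => rw [hl] at h; simp at h
  | some ch => rw [hl] at h; exact pvLookup_sub_flatMap hl c h

theorem pvStore_lookup {m : List (String × Int)} {n : String} {u : Int} (w : Int)
    (hu : pvLookup m n = some u) (x : String) :
    pvLookup (pvStore m n w) x = if x = n then some w else pvLookup m x := by
  induction m with
  | nil => simp [pvLookup] at hu
  | cons p rest ih =>
    obtain ⟨k, v⟩ := p
    by_cases hk : k = n
    · subst hk
      rw [pvStore, if_pos rfl]
      by_cases hx : k = x
      · subst hx; simp [pvLookup]
      · have hx' : ¬ x = k := fun h => hx h.symm
        simp [pvLookup, hx, hx']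
    · rw [pvLookup, if_neg hk] at hu
      rw [pvStore, if_neg hk]
      by_cases hx : k = x
      · subst hx
        have hx' : ¬ k = n := hk
        simp [pvLookup, fun h : k = n => hk h]
      · have hx' : ¬ x = k := fun h => hx h.symm
        simp [pvLookup, hx, ih hu]

theorem pv_filter_erase_lt {p : String → Bool} {n : String} (hp : p n = true) :
    ∀ {K : List String}, n ∈ K → ((K.erase n).filter p).length < (K.filter p).length := by
  intro K
  induction K with
  | nil => intro h; simp at h
  | cons k rest ih =>
    intro hmem
    by_cases hk : k = n
    · subst hk
      rw [List.erase_cons_head, List.filter_cons, if_pos hp]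
      simp
    · rw [List.erase_cons_tail (by simpa using hk)]
      have hm : n ∈ rest := by
        rcases List.mem_cons.mp hmem with h | h
        · exact absurd h.symm hk
        · exact h
      rw [List.filter_cons, List.filter_cons]
      cases hpk : p k
      · simpa using ih hm
      · simpa using Nat.succ_lt_succ (ih hm)

-- ---------- unfolding equations for the four recursors ----------

theorem goB_eq (st : List (String × List String)) (sal : List (String × Int)) (K : List String) (n : String) :
    goB st sal K n =
      match pvLookup sal n with
      | none => 0
      | some cached =>
        if cached ≠ 0 then cached
        else
          match pvLookup st n with
          | none => 0
          | some ch =>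
            if n ∈ K then (if goBSum st sal (K.erase n) ch = 0 then 1 else goBSum st sal (K.erase n) ch)
            else 0 := by
  rw [goB]; rfl

theorem goB_none {sal : List (String × Int)} {n : String} (st : List (String × List String)) (K : List String)
    (h : pvLookup sal n = none) : goB st sal K n = 0 := by
  rw [goB_eq, h]

theorem goB_cached {sal : List (String × Int)} {n : String} {v : Int} (st : List (String × List String)) (K : List String)
    (h : pvLookup sal n = some v) (hv : v ≠ 0) : goB st sal K n = v := by
  rw [goB_eq, h]; simp [hv]

theorem goB_zero {sal : List (String × Int)} {n : String} {ch : List String} (st : List (String × List String)) {K : List String}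
    (h : pvLookup sal n = some 0) (hst : pvLookup st n = some ch) (hK : n ∈ K) :
    goB st sal K n = (if goBSum st sal (K.erase n) ch = 0 then 1 else goBSum st sal (K.erase n) ch) := by
  rw [goB_eq, h]; simp [hst, hK]

theorem goBSum_nil (st : List (String × List String)) (sal : List (String × Int)) (K : List String) :
    goBSum st sal K [] = 0 := by rw [goBSum]

theorem goBSum_cons (st : List (String × List String)) (sal : List (String × Int)) (K : List String)
    (c : String) (r : List String) :
    goBSum st sal K (c :: r) = goB st sal K c + goBSum st sal K r := by rw [goBSum]

theorem goA_eq (st : List (String × List String)) (K : List String) (n : String) (m : List (String × Int)) :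
    goA st K n m =
      match pvLookup m n with
      | none => (0, m)
      | some v =>
        if v ≠ 0 then (v, m)
        else
          match pvLookup st n with
          | none => (0, m)
          | some ch =>
            if n ∈ K then
              ((if (goAList st (K.erase n) ch 0 m).1 = 0 then 1 else (goAList st (K.erase n) ch 0 m).1),
               pvStore (goAList st (K.erase n) ch 0 m).2 n
                 (if (goAList st (K.erase n) ch 0 m).1 = 0 then 1 else (goAList st (K.erase n) ch 0 m).1))
            else (0, m) := by
  rw [goA]; rfl

theorem goA_cached {m : List (String × Int)} {n : String} {v : Int} (st : List (String × List String)) (K : List String)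
    (h : pvLookup m n = some v) (hv : v ≠ 0) : goA st K n m = (v, m) := by
  rw [goA_eq, h]; simp [hv]

theorem goA_zero {m : List (String × Int)} {n : String} {ch : List String} (st : List (String × List String)) {K : List String}
    (h : pvLookup m n = some 0) (hst : pvLookup st n = some ch) (hK : n ∈ K) :
    goA st K n m =
      ((if (goAList st (K.erase n) ch 0 m).1 = 0 then 1 else (goAList st (K.erase n) ch 0 m).1),
       pvStore (goAList st (K.erase n) ch 0 m).2 n
         (if (goAList st (K.erase n) ch 0 m).1 = 0 then 1 else (goAList st (K.erase n) ch 0 m).1)) := by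
  rw [goA_eq, h]; simp [hst, hK]

theorem goAList_nil (st : List (String × List String)) (K : List String) (acc : Int) (m : List (String × Int)) :
    goAList st K [] acc m = (acc, m) := by rw [goAList]

theorem goAList_cons (st : List (String × List String)) (K : List String) (l : String) (r : List String)
    (acc : Int) (m : List (String × Int)) :
    goAList st K (l :: r) acc m = goAList st K r (acc + (goA st K l m).1) (goA st K l m).2 := by
  rw [goAList]

-- ---------- closure lemmas ----------

theorem pv_mem_step_iff {st : List (String × List String)} {sal : List (String × Int)} {S : List String} {x : String} :
    x ∈ pvStep st sal S ↔ x ∈ S ∨ ∃ n ∈ S, pvLookup sal n = some 0 ∧ x ∈ pvChildren st n := by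
  simp only [pvStep, List.mem_append, List.mem_flatMap, pvLookup_eq_lookup]
  refine or_congr Iff.rfl ⟨?_, ?_⟩
  · rintro ⟨n, hn, hx⟩
    by_cases h : List.lookup n sal = some 0
    · rw [if_pos h] at hx; exact ⟨n, hn, h, hx⟩
    · rw [if_neg h] at hx; simp at hx
  · rintro ⟨n, hn, h0, hx⟩
    exact ⟨n, hn, by rw [if_pos h0]; exact hx⟩

theorem pvStep_infl {st : List (String × List String)} {sal : List (String × Int)} {S : List String} :
    ∀ x ∈ S, x ∈ pvStep st sal S := fun x hx => pv_mem_step_iff.mpr (Or.inl hx)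

theorem pvStep_mono {st : List (String × List String)} {sal : List (String × Int)} {S T : List String}
    (h : ∀ x ∈ S, x ∈ T) : ∀ x ∈ pvStep st sal S, x ∈ pvStep st sal T := by
  intro x hx
  rcases pv_mem_step_iff.mp hx with hx | ⟨n, hn, h0, hc⟩
  · exact pv_mem_step_iff.mpr (Or.inl (h x hx))
  · exact pv_mem_step_iff.mpr (Or.inr ⟨n, h n hn, h0, hc⟩)

theorem pv_iter_infl {st : List (String × List String)} {sal : List (String × Int)} :
    ∀ (j : Nat) {S : List String}, ∀ x ∈ S, x ∈ (pvStep st sal)^[j] S := by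
  intro j
  induction j with
  | zero => simp
  | succ j ih =>
    intro S x hx
    rw [Function.iterate_succ_apply]
    exact ih x (pvStep_infl x hx)

theorem pv_iter_stable {st : List (String × List String)} {sal : List (String × Int)} {T : List String}
    (h : ∀ x ∈ pvStep st sal T, x ∈ T) :
    ∀ (j : Nat), ∀ x ∈ (pvStep st sal)^[j] T, x ∈ T := by
  intro j
  induction j with
  | zero => simp
  | succ j ih =>
    intro x hx
    rw [Function.iterate_succ_apply'] at hx
    exact h x (pvStep_mono ih x hx)

theorem pv_iter_sub_univ {st : List (String × List String)} {sal : List (String × Int)} {S : List String} :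
    ∀ (j : Nat), ∀ x ∈ (pvStep st sal)^[j] S, x ∈ S ++ st.flatMap (·.2) := by
  intro j
  induction j with
  | zero => intro x hx; simpa using Or.inl hx
  | succ j ih =>
    intro x hx
    rw [Function.iterate_succ_apply'] at hx
    rcases pv_mem_step_iff.mp hx with hx | ⟨n, _, _, hc⟩
    · exact ih x hx
    · simpa using Or.inr (pvChildren_sub_flatMap hc)

theorem pv_exists_stable {st : List (String × List String)} {sal : List (String × Int)} (S : List String) :
    ∃ i ≤ (S ++ st.flatMap (·.2)).toFinset.card,
      ∀ x ∈ pvStep st sal ((pvStep st sal)^[i] S), x ∈ (pvStep st sal)^[i] S := by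
  by_contra hcon
  push_neg at hcon
  set N := (S ++ st.flatMap (·.2)).toFinset.card with hN
  have grow : ∀ i ≤ N + 1, S.toFinset.card + i ≤ ((pvStep st sal)^[i] S).toFinset.card := by
    intro i
    induction i with
    | zero => simp
    | succ i ih =>
      intro hi
      obtain ⟨x, hx1, hx2⟩ := hcon i (by omega)
      have hss : ((pvStep st sal)^[i] S).toFinset ⊂ (pvStep st sal ((pvStep st sal)^[i] S)).toFinset := by
        constructor
        · intro y hy
          simp only [List.mem_toFinset] at hy ⊢
          exact pvStep_infl y hy
        · intro hsub
          exact hx2 (by simpa using hsub (by simpa using hx1))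
      have := Finset.card_lt_card hss
      rw [Function.iterate_succ_apply']
      have := ih (by omega)
      omega
  have hle : ((pvStep st sal)^[N + 1] S).toFinset.card ≤ N := by
    apply Finset.card_le_card
    intro y hy
    simp only [List.mem_toFinset] at hy ⊢
    exact pv_iter_sub_univ (N + 1) y hy
  have := grow (N + 1) (le_refl _)
  omega

theorem pvClosure_infl {st : List (String × List String)} {sal : List (String × Int)} {S : List String} :
    ∀ x ∈ S, x ∈ pvClosure st sal S := fun x hx => pv_iter_infl _ x hx

theorem pvClosure_closed {st : List (String × List String)} {sal : List (String × Int)} {S : List String}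
    {x c : String} (hx : x ∈ pvClosure st sal S) (h0 : pvLookup sal x = some 0)
    (hc : c ∈ pvChildren st x) : c ∈ pvClosure st sal S := by
  obtain ⟨i, hi, hstab⟩ := pv_exists_stable (st := st) (sal := sal) S
  set N := (S ++ st.flatMap (·.2)).toFinset.card with hN
  have hsplit : (pvStep st sal)^[N + 1] S = (pvStep st sal)^[(N + 1) - i] ((pvStep st sal)^[i] S) := by
    rw [← Function.iterate_add_apply]
    congr 1
    omega
  have hxi : x ∈ (pvStep st sal)^[i] S := by
    have := hx
    unfold pvClosure at this
    rw [hsplit] at this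
    exact pv_iter_stable hstab _ x this
  have hci : c ∈ (pvStep st sal)^[i] S :=
    hstab c (pv_mem_step_iff.mpr (Or.inr ⟨x, hxi, h0, hc⟩))
  unfold pvClosure
  rw [hsplit]
  exact pv_iter_infl _ c hci

-- ---------- B does not depend on the allowed set K (on Pre_ inputs) ----------

theorem goB_ext (st : List (String × List String)) (sal : List (String × Int)) (cur : String)
    (hc : ∀ n ∈ pvR st sal cur, pvLookup sal n = some 0 →
        (pvLookup st n).isSome ∧ ¬ pvReachP st sal n n) :
    ∀ (N : Nat) (K K' : List String) (n : String), pvMu st sal cur K ≤ N →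
      K.Nodup → K'.Nodup → (∀ x ∈ K, x ∈ K') →
      n ∈ pvR st sal cur → pvHz st sal cur K n →
      goB st sal K n = goB st sal K' n := by
  intro N
  induction N with
  | zero =>
    intro K K' n hmu hnd hnd' hsub hR hz
    cases hv : pvLookup sal n with
    | none => rw [goB_none st K hv, goB_none st K' hv]
    | some v =>
      by_cases h0 : v = 0
      · exfalso
        subst h0
        have hnK : n ∈ K := by
          rcases hz n hR hv with h | h
          · exact h
          · exact absurd h (hc n hR hv).2
        have hmem : n ∈ K.filter fun z => decide (pvLookup sal z = some 0 ∧ z ∈ pvR st sal cur) := by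
          rw [List.mem_filter]
          exact ⟨hnK, by simp [hv, hR]⟩
        have := List.length_pos_of_mem hmem
        unfold pvMu at hmu
        omega
      · rw [goB_cached st K hv h0, goB_cached st K' hv h0]
  | succ N ih =>
    intro K K' n hmu hnd hnd' hsub hR hz
    cases hv : pvLookup sal n with
    | none => rw [goB_none st K hv, goB_none st K' hv]
    | some v =>
      by_cases h0 : v = 0
      · subst h0
        obtain ⟨hstS, hacyc⟩ := hc n hR hv
        obtain ⟨ch, hst⟩ := Option.isSome_iff_exists.mp hstS
        have hnK : n ∈ K := by
          rcases hz n hR hv with h | h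
          · exact h
          · exact absurd h hacyc
        have hch : pvChildren st n = ch := by unfold pvChildren; rw [← pvLookup_eq_lookup, hst]; rfl
        have hmu' : pvMu st sal cur (K.erase n) ≤ N := by
          have := pv_filter_erase_lt (p := fun z => decide (pvLookup sal z = some 0 ∧ z ∈ pvR st sal cur))
            (by simp [hv, hR]) hnK
          unfold pvMu at hmu ⊢
          omega
        have key : ∀ ch'', (∀ c ∈ ch'', c ∈ ch) →
            goBSum st sal (K.erase n) ch'' = goBSum st sal (K'.erase n) ch'' := by
          intro ch''
          induction ch'' with
          | nil => intro _; rw [goBSum_nil, goBSum_nil]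
          | cons c r ihl =>
            intro hmem
            have hcch : c ∈ ch := hmem c (List.mem_cons_self)
            have hcR : c ∈ pvR st sal cur := pvClosure_closed hR hv (hch ▸ hcch)
            have hz' : pvHz st sal cur (K.erase n) c := by
              intro z hzR hz0
              rcases hz z hzR hz0 with hzK | hzr
              · by_cases hzn : z = n
                · subst hzn
                  exact Or.inr (pvClosure_infl c (hch ▸ hcch))
                · exact Or.inl ((List.mem_erase_of_ne hzn).mpr hzK)
              · exact Or.inr (pvClosure_closed hzr hv (hch ▸ hcch))
            rw [goBSum_cons, goBSum_cons]
            rw [ih (K.erase n) (K'.erase n) c hmu' (hnd.erase n) (hnd'.erase n)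
                  (fun x hx => by
                    have hxn := ((hnd.mem_erase_iff).mp hx)
                    exact (List.mem_erase_of_ne hxn.1).mpr (hsub x hxn.2))
                  hcR hz']
            rw [ihl (fun c' hc' => hmem c' (List.mem_cons_of_mem _ hc'))]
        have hnK' : n ∈ K' := hsub n hnK
        rw [goB_zero st hv hst hnK, goB_zero st hv hst hnK']
        rw [key ch (fun _ h => h)]
      · rw [goB_cached st K hv h0, goB_cached st K' hv h0]

-- goBSum at the full key set minus n computes pvSumV
theorem goBSum_erase_eq (st : List (String × List String)) (sal : List (String × Int)) (cur : String)
    (hc : ∀ n ∈ pvR st sal cur, pvLookup sal n = some 0 →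
        (pvLookup st n).isSome ∧ ¬ pvReachP st sal n n)
    (hnd0 : (pvK0 sal).Nodup)
    {n : String} (hR : n ∈ pvR st sal cur) (h0 : pvLookup sal n = some 0) :
    ∀ ch'', (∀ c ∈ ch'', c ∈ pvChildren st n) →
      goBSum st sal ((pvK0 sal).erase n) ch'' = pvSumV st sal ch'' := by
  intro ch''
  induction ch'' with
  | nil => intro _; rw [goBSum_nil]; rfl
  | cons c r ihl =>
    intro hmem
    have hcc : c ∈ pvChildren st n := hmem c (List.mem_cons_self)
    have hcR : c ∈ pvR st sal cur := pvClosure_closed hR h0 hcc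
    have hz' : pvHz st sal cur ((pvK0 sal).erase n) c := by
      intro z hzR hz0
      by_cases hzn : z = n
      · subst hzn
        exact Or.inr (pvClosure_infl c hcc)
      · exact Or.inl ((List.mem_erase_of_ne hzn).mpr (pvLookup_mem_keys hz0))
    rw [goBSum_cons, pvSumV]
    rw [goB_ext st sal cur hc (pvMu st sal cur ((pvK0 sal).erase n)) ((pvK0 sal).erase n) (pvK0 sal) c
        le_rfl (hnd0.erase n) hnd0 (fun x hx => (hnd0.mem_erase_iff.mp hx).2) hcR hz']
    rw [ihl (fun c' hc' => hmem c' (List.mem_cons_of_mem _ hc'))]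
    rfl

-- the two unfoldings of pvV used by the A-side proof
theorem pvV_cached {st : List (String × List String)} {sal : List (String × Int)} {n : String} {v : Int}
    (h0 : pvLookup sal n = some v) (hv : v ≠ 0) : pvV st sal n = v := by
  unfold pvV
  rw [goB_cached st (pvK0 sal) h0 hv]

theorem pvV_zero_eq (st : List (String × List String)) (sal : List (String × Int)) (cur : String)
    (hc : ∀ n ∈ pvR st sal cur, pvLookup sal n = some 0 →
        (pvLookup st n).isSome ∧ ¬ pvReachP st sal n n)
    (hnd0 : (pvK0 sal).Nodup)
    {n : String} {ch : List String} (hR : n ∈ pvR st sal cur)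
    (h0 : pvLookup sal n = some 0) (hst : pvLookup st n = some ch) :
    pvV st sal n = (if pvSumV st sal ch = 0 then 1 else pvSumV st sal ch) := by
  have hch : pvChildren st n = ch := by unfold pvChildren; rw [← pvLookup_eq_lookup, hst]; rfl
  have hnK0 : n ∈ pvK0 sal := pvLookup_mem_keys h0
  unfold pvV
  rw [goB_zero st h0 hst hnK0]
  rw [goBSum_erase_eq st sal cur hc hnd0 hR h0 ch (fun c hcc => hch ▸ hcc)]

theorem goAList_main (st : List (String × List String)) (sal : List (String × Int)) (cur : String) (K' : List String)
    (Hnode : ∀ (n : String) (m : List (String × Int)), n ∈ pvR st sal cur → pvHz st sal cur K' n →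
        pvInv st sal cur m →
        (goA st K' n m).1 = pvV st sal n ∧ pvInv st sal cur (goA st K' n m).2) :
    ∀ (ch : List String) (acc : Int) (m : List (String × Int)),
      (∀ c ∈ ch, c ∈ pvR st sal cur ∧ pvHz st sal cur K' c) → pvInv st sal cur m →
      (goAList st K' ch acc m).1 = acc + pvSumV st sal ch ∧
        pvInv st sal cur (goAList st K' ch acc m).2 := by
  intro ch
  induction ch with
  | nil =>
    intro acc m _ hm
    rw [goAList_nil]
    exact ⟨by simp [pvSumV], hm⟩
  | cons c r ihl =>
    intro acc m hmem hm
    obtain ⟨h1, h2⟩ := Hnode c m (hmem c (List.mem_cons_self)).1 (hmem c (List.mem_cons_self)).2 hm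
    rw [goAList_cons]
    obtain ⟨h3, h4⟩ := ihl (acc + (goA st K' c m).1) (goA st K' c m).2
      (fun c' hc' => hmem c' (List.mem_cons_of_mem _ hc')) h2
    refine ⟨?_, h4⟩
    rw [h3, h1, pvSumV]
    omega

theorem goA_main (st : List (String × List String)) (sal : List (String × Int)) (cur : String)
    (hb : ∀ n ∈ pvR st sal cur, (pvLookup sal n).isSome)
    (hc : ∀ n ∈ pvR st sal cur, pvLookup sal n = some 0 →
        (pvLookup st n).isSome ∧ ¬ pvReachP st sal n n)
    (hnd0 : (pvK0 sal).Nodup) :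
    ∀ (N : Nat) (K : List String), pvMu st sal cur K ≤ N → K.Nodup → (∀ x ∈ K, x ∈ pvK0 sal) →
      ∀ (n : String) (m : List (String × Int)), n ∈ pvR st sal cur → pvHz st sal cur K n →
        pvInv st sal cur m →
        (goA st K n m).1 = pvV st sal n ∧ pvInv st sal cur (goA st K n m).2 := by
  intro N
  induction N with
  | zero =>
    intro K hmu hnd hKsub n m hR hz hm
    cases hmn : pvLookup m n with
    | none =>
      exfalso
      rcases hm n with h | ⟨_, _, h, _⟩
      · rw [hmn] at h
        have := hb n hR
        rw [← h] at this
        simp at this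
      · rw [hmn] at h; simp at h
    | some v =>
      by_cases h0 : v = 0
      · exfalso
        subst h0
        have hz0 : pvLookup sal n = some 0 := by
          rcases hm n with h | ⟨_, _, h, hne⟩
          · rw [← h, hmn]
          · rw [hmn] at h
            exact absurd (Option.some.inj h).symm hne
        have hnK : n ∈ K := by
          rcases hz n hR hz0 with h | h
          · exact h
          · exact absurd h (hc n hR hz0).2
        have hmem : n ∈ K.filter fun z => decide (pvLookup sal z = some 0 ∧ z ∈ pvR st sal cur) := by
          rw [List.mem_filter]
          exact ⟨hnK, by simp [hz0, hR]⟩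
        have := List.length_pos_of_mem hmem
        unfold pvMu at hmu
        omega
      · rw [goA_cached st K hmn h0]
        refine ⟨?_, hm⟩
        rcases hm n with h | ⟨_, _, h, _⟩
        · rw [hmn] at h
          exact (pvV_cached h.symm h0).symm
        · rw [hmn] at h
          exact (Option.some.inj h)
  | succ N ih =>
    intro K hmu hnd hKsub n m hR hz hm
    cases hmn : pvLookup m n with
    | none =>
      exfalso
      rcases hm n with h | ⟨_, _, h, _⟩
      · rw [hmn] at h
        have := hb n hR
        rw [← h] at this
        simp at this
      · rw [hmn] at h; simp at h
    | some v =>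
      by_cases h0 : v = 0
      · subst h0
        have hz0 : pvLookup sal n = some 0 := by
          rcases hm n with h | ⟨_, _, h, hne⟩
          · rw [← h, hmn]
          · rw [hmn] at h
            exact absurd (Option.some.inj h).symm hne
        obtain ⟨hstS, hacyc⟩ := hc n hR hz0
        obtain ⟨ch, hst⟩ := Option.isSome_iff_exists.mp hstS
        have hch : pvChildren st n = ch := by unfold pvChildren; rw [← pvLookup_eq_lookup, hst]; rfl
        have hnK : n ∈ K := by
          rcases hz n hR hz0 with h | h
          · exact h
          · exact absurd h hacyc
        have hmu' : pvMu st sal cur (K.erase n) ≤ N := by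
          have := pv_filter_erase_lt (p := fun z => decide (pvLookup sal z = some 0 ∧ z ∈ pvR st sal cur))
            (by simp [hz0, hR]) hnK
          unfold pvMu at hmu ⊢
          omega
        have hsub' : ∀ x ∈ K.erase n, x ∈ pvK0 sal := fun x hx => hKsub x (List.mem_of_mem_erase hx)
        have Hnode := ih (K.erase n) hmu' (hnd.erase n) hsub'
        have hcond : ∀ c ∈ ch, c ∈ pvR st sal cur ∧ pvHz st sal cur (K.erase n) c := by
          intro c hcch
          refine ⟨pvClosure_closed hR hz0 (hch ▸ hcch), ?_⟩
          intro z hzR hzz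
          rcases hz z hzR hzz with hzK | hzr
          · by_cases hzn : z = n
            · subst hzn
              exact Or.inr (pvClosure_infl c (hch ▸ hcch))
            · exact Or.inl ((List.mem_erase_of_ne hzn).mpr hzK)
          · exact Or.inr (pvClosure_closed hzr hz0 (hch ▸ hcch))
        obtain ⟨hsum, hinv2⟩ := goAList_main st sal cur (K.erase n) Hnode ch 0 m hcond hm
        rw [goA_zero st hmn hst hnK]
        have hs0 : (goAList st (K.erase n) ch 0 m).1 = pvSumV st sal ch := by rw [hsum]; omega
        have hVn : pvV st sal n = (if pvSumV st sal ch = 0 then 1 else pvSumV st sal ch) :=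
          pvV_zero_eq st sal cur hc hnd0 hR hz0 hst
        have hval : (if (goAList st (K.erase n) ch 0 m).1 = 0 then 1
            else (goAList st (K.erase n) ch 0 m).1) = pvV st sal n := by
          rw [hs0, hVn]
        refine ⟨hval, ?_⟩
        have hpsome : ∃ u, pvLookup (goAList st (K.erase n) ch 0 m).2 n = some u := by
          rcases hinv2 n with h | ⟨_, _, h, _⟩
          · exact ⟨0, by rw [h, hz0]⟩
          · exact ⟨_, h⟩
        obtain ⟨u, hu⟩ := hpsome
        intro k
        rw [pvStore_lookup _ hu k]
        by_cases hk : k = n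
        · subst hk
          refine Or.inr ⟨hz0, hR, ?_, ?_⟩
          · rw [if_pos rfl, hval]
          · rw [← hval]
            split_ifs with h
            · omega
            · exact h
        · rw [if_neg hk]
          exact hinv2 k
      · rw [goA_cached st K hmn h0]
        refine ⟨?_, hm⟩
        rcases hm n with h | ⟨_, _, h, _⟩
        · rw [hmn] at h
          exact (pvV_cached h.symm h0).symm
        · rw [hmn] at h
          exact (Option.some.inj h)

-- ===== VERDICT (by name: the statement is the Claim_ definition above) =====
theorem salary_finder_spec : Claim_equal_salary_finder := by
  intro cur st sal hdom hpre
  obtain ⟨hb, hc, hndsal, hndst⟩ := hpre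
  have hc' : ∀ n ∈ pvR st sal cur, pvLookup sal n = some 0 →
      (pvLookup st n).isSome ∧ ¬ pvReachP st sal n n := by
    intro n hn h0
    rw [pvLookup_eq_lookup] at h0
    have := hc n hn h0
    rwa [← pvLookup_eq_lookup] at this
  have hb' : ∀ n ∈ pvR st sal cur, (pvLookup sal n).isSome := by
    intro n hn
    rw [pvLookup_eq_lookup]
    exact hb n hn
  have hnd0 : (pvK0 sal).Nodup := hndsal
  have hcur : cur ∈ pvR st sal cur := pvClosure_infl cur (by simp)
  have hz0 : pvHz st sal cur (pvK0 sal) cur := fun z _ h0 => Or.inl (pvLookup_mem_keys h0)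
  have hinv0 : pvInv st sal cur sal := fun _ => Or.inl rfl
  have hmain := goA_main st sal cur hb' hc' hnd0 (pvMu st sal cur (pvK0 sal)) (pvK0 sal)
    le_rfl hnd0 (fun _ hx => hx) cur sal hcur hz0 hinv0
  unfold Spec_salary_finder salary_finder salary_finder_alt
  exact hmain.1
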